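-- pv_equiv track=rewrite | github.com/IUT-Blagnac/sae2-02-Furiza31 | analyse/code_a_analyser/simplicite_114.py | byeespace1
-- ===== SOURCE A (Python) =====
-- def byeespace1(text):
--   cpt = 1
--   #Cas où il y a moins de 2 caractères.
--   if len(text) == 0 or len(text) == 1:
--     return text.replace(" ", "")
--
--   #On s'occupe du premier caractère
--   if text[0] == " " and text[1] != " ":
--     text = text[1:]
--
--   #Partie qui retire les espaces et reforme le texte.
--   for lettre in text[:-1]:
--     if text[cpt] == " ":
--       if cpt < len(text)-1:
--         if text[cpt-1] != " " and text[cpt+1] != " ":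
--           text = text[:cpt] + text[cpt+1:]
--           cpt -= 1
--     cpt += 1
--
--   #On s'occupe du dernier caractère.
--   if text[len(text)-1] == " " and text[len(text)-2] != " ":
--       text = text[:len(text)-1]
--
--   return text
-- ===== SOURCE B (Python) =====
-- def byeespace1(text):
--     # run-length scan: emit each maximal run of equal chars unless it is a lone space
--     out = []
--     i = 0
--     n = len(text)
--     while i < n:
--         c = text[i]
--         j = i + 1
--         while j < n and text[j] == c:
--             j += 1
--         if c != " " or j - i > 1:
--             out.append(text[i:j])
--         i = j
--     return "".join(out)
-- ===== Notes on version B (the rewrite author's own statement) =====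
-- stated objective: alternative
-- what changed: Replaces A's in-place character-deletion scan (a cpt index walked over a string that is re-sliced and shrunk while iterating, plus separate first/last-character fixups) by a single run-length pass: group the text into maximal runs of equal characters and emit every run except a lone space.
import Mathlib
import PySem

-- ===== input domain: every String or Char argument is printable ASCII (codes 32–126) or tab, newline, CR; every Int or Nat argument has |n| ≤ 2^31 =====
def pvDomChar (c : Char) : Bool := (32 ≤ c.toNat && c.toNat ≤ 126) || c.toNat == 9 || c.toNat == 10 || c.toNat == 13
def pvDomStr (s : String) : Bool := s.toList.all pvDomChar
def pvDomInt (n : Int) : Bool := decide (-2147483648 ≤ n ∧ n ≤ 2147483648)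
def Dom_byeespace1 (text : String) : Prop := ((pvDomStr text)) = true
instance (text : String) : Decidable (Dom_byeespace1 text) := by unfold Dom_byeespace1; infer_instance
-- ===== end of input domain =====

-- B replaces A's in-place deletion scan (index cpt over a string re-sliced while looping)
-- by a single run-length pass that drops each maximal run that is a lone space (objective: alternative).

-- ===== PORT A =====
-- one iteration of A's `for` loop body, on state (text, cpt); the snapshot element is ignored.
-- the `pyGetD` default 'A' is unreachable: every index A computes is in Python's valid
-- (possibly negative) range, so `pyGetD` agrees with Python's text[...] everywhere.
def pyABody (s : List Char × Int) : List Char × Int :=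
  let text := s.1
  let cpt := s.2
  let s' :=
    if PySem.List.pyGetD text cpt 'A' == ' ' then
      if cpt < (text.length : Int) - 1 then
        if PySem.List.pyGetD text (cpt - 1) 'A' != ' ' && PySem.List.pyGetD text (cpt + 1) 'A' != ' ' then
          (PySem.List.slice text none (some cpt) ++ PySem.List.slice text (some (cpt + 1)) none, cpt - 1)
        else (text, cpt)
      else (text, cpt)
    else (text, cpt)
  (s'.1, s'.2 + 1)

-- A's last three lines: drop the final character if it is a space whose predecessor is not
def pyAPost (t2 : List Char) : List Char :=
  if PySem.List.pyGetD t2 ((t2.length : Int) - 1) 'A' == ' ' &&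
     PySem.List.pyGetD t2 ((t2.length : Int) - 2) 'A' != ' ' then
    PySem.List.slice t2 none (some ((t2.length : Int) - 1))
  else t2

def byeespace1 (text : String) : String :=
  let cs := text.toList
  if cs.length = 0 ∨ cs.length = 1 then
    String.ofList (PySem.Chars.replace cs [' '] [])
  else
    let t1 := if PySem.List.pyGetD cs 0 'A' == ' ' && PySem.List.pyGetD cs 1 'A' != ' ' then
                PySem.List.slice cs (some 1) none
              else cs
    let snap := PySem.List.slice t1 none (some (-1))
    let st := snap.foldl (fun s _ => pyABody s) (t1, 1)
    String.ofList (pyAPost st.1)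

-- ===== PORT B =====
-- Source B: scan runs of equal characters; emit each run unless it is a single space
def altGo (cs : List Char) : List Char :=
  match cs with
  | [] => []
  | c :: rest =>
    let run := rest.takeWhile (· == c)
    let rest' := rest.dropWhile (· == c)
    (if c != ' ' || run.length + 1 > 1 then c :: run else []) ++ altGo rest'
termination_by cs.length
decreasing_by
  simp only [List.length_cons]
  exact Nat.lt_succ_of_le (List.length_dropWhile_le _ _)

def byeespace1_alt (text : String) : String := String.ofList (altGo text.toList)

-- ===== PRECONDITION & SPEC =====
def Spec_byeespace1 (text : String) (out : String) : Prop := out = byeespace1_alt text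
instance (text : String) (out : String) : Decidable (Spec_byeespace1 text out) := by unfold Spec_byeespace1; infer_instance

-- ===== CLAIM (what is proved, stated in full; the proofs are below) =====
def Claim_equal_byeespace1 : Prop := ∀ (text : String), Dom_byeespace1 text → Spec_byeespace1 text (byeespace1 text)

-- ===== LEMMAS AND PROOFS =====

-- the effect of A's loop expressed structurally: `p` is the character to the left of the
-- cursor in the current text, `rest` the part not yet scanned; the loop deletes a space
-- that has a non-space on both sides and is not the final character.
def cleanA (p : Char) : List Char → List Char
  | [] => []
  | c :: rest =>
    if c = ' ' ∧ rest ≠ [] ∧ p ≠ ' ' ∧ rest.headD 'A' ≠ ' ' then cleanA p rest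
    else c :: cleanA c rest

-- like cleanA, but the end of the string also counts as a non-space neighbour
-- (this folds A's final-character fixup into the scan)
def cleanE (p : Char) : List Char → List Char
  | [] => []
  | c :: rest =>
    if c = ' ' ∧ p ≠ ' ' ∧ (rest = [] ∨ rest.headD 'A' ≠ ' ') then cleanE p rest
    else c :: cleanE c rest

lemma cleanA_ne_nil (l : List Char) (p : Char) (h : l ≠ []) : cleanA p l ≠ [] := by
  induction l generalizing p with
  | nil => exact absurd rfl h
  | cons c rest ih =>
    unfold cleanA
    split
    · next hc => exact ih p hc.2.1
    · simp

lemma getD_cons_succ (a : Char) (l : List Char) (n : Nat) (d : Char) :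
    (a :: l).getD (n + 1) d = l.getD n d := by
  simp [List.getD]

-- A's loop as a fold equals cleanA
lemma loop_eq (snap : List Char) : ∀ (acc rest : List Char) (p : Char),
    acc ≠ [] → acc.getLast? = some p → snap.length = rest.length →
    snap.foldl (fun s _ => pyABody s) (acc ++ rest, (acc.length : Int))
      = (acc ++ cleanA p rest, ((acc ++ cleanA p rest).length : Int)) := by
  induction snap with
  | nil =>
    intro acc rest p _ _ hlen
    have : rest = [] := List.eq_nil_of_length_eq_zero hlen.symm
    subst this
    simp [cleanA]
  | cons x snap' ih =>
    intro acc rest p hacc hlast hlen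
    match rest with
    | [] => simp at hlen
    | c :: rest' =>
      have hpos : 0 < acc.length := List.length_pos_iff.mpr hacc
      rw [List.foldl_cons]
      have hget : PySem.List.pyGetD (acc ++ c :: rest') ((acc.length : Nat) : Int) 'A' = c := by
        rw [PySem.List.pyGetD_natCast]
        simp [List.getD]
      have e1 : ((acc.length : Nat) : Int) - 1 = ((acc.length - 1 : Nat) : Int) := by omega
      have hleft : PySem.List.pyGetD (acc ++ c :: rest') (((acc.length : Nat) : Int) - 1) 'A' = p := by
        rw [e1, PySem.List.pyGetD_natCast]
        have h1 : acc[acc.length - 1]? = some p := by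
          rw [← List.getLast?_eq_getElem?]; exact hlast
        simp [List.getD, List.getElem?_append_left (by omega : acc.length - 1 < acc.length), h1]
      have hbody : pyABody (acc ++ c :: rest', (acc.length : Int)) =
          if c = ' ' ∧ rest' ≠ [] ∧ p ≠ ' ' ∧ rest'.headD 'A' ≠ ' ' then
            (acc ++ rest', ((acc.length : Int) - 1) + 1)
          else (acc ++ c :: rest', (acc.length : Int) + 1) := by
        simp only [pyABody, hget, hleft]
        by_cases hc : c = ' '
        · simp only [hc, beq_self_eq_true, if_true]
          rcases rest' with _ | ⟨r, rs⟩
          · simp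
          · have hlt : (acc.length : Int) < (((acc ++ ' ' :: r :: rs).length : Nat) : Int) - 1 := by
              rw [List.length_append]
              push_cast
              simp
              omega
            have e2 : ((acc.length : Nat) : Int) + 1 = ((acc.length + 1 : Nat) : Int) := by omega
            have hright : PySem.List.pyGetD (acc ++ ' ' :: r :: rs) (((acc.length : Nat) : Int) + 1) 'A' = r := by
              rw [e2, PySem.List.pyGetD_natCast]
              have hh : (acc ++ ' ' :: r :: rs)[acc.length + 1]? = some r := by
                rw [List.getElem?_append_right (by omega)]
                simp
              simp [List.getD]
            have hsl1 : PySem.List.slice (acc ++ ' ' :: r :: rs) none (some ((acc.length : Nat) : Int)) = acc := by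
              rw [PySem.List.slice_to_natCast]
              exact List.take_left
            have hsl2 : PySem.List.slice (acc ++ ' ' :: r :: rs) (some (((acc.length : Nat) : Int) + 1)) none = r :: rs := by
              rw [e2, PySem.List.slice_from_natCast]
              have hsplit : acc ++ ' ' :: r :: rs = (acc ++ [' ']) ++ r :: rs := by simp
              rw [hsplit, List.drop_left' (by simp)]
            simp only [hlt, if_true, hright, hsl1, hsl2]
            by_cases hp : p = ' '
            · simp [hp]
            · by_cases hrr : r = ' '
              · simp [hp, hrr]
              · simp [hp, hrr]
        · simp [hc]
      rw [hbody]
      by_cases hcond : c = ' ' ∧ rest' ≠ [] ∧ p ≠ ' ' ∧ rest'.headD 'A' ≠ ' '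
      · rw [if_pos hcond]
        have e3 : ((acc.length : Int) - 1) + 1 = (acc.length : Int) := by ring
        rw [e3]
        have := ih acc rest' p hacc hlast (by simpa using hlen)
        rw [this, cleanA, if_pos hcond]
      · rw [if_neg hcond]
        have e4 : (acc ++ c :: rest', (acc.length : Int) + 1) =
            ((acc ++ [c]) ++ rest', (((acc ++ [c]).length : Nat) : Int)) := by
          simp [List.length_append]
        rw [e4]
        have := ih (acc ++ [c]) rest' c (by simp) List.getLast?_concat (by simpa using hlen)
        rw [this, cleanA, if_neg hcond]
        simp

-- A's final-character fixup commutes with a cons when the tail has ≥ 2 characters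
lemma pyAPost_cons (h : Char) (l : List Char) (hl : 2 ≤ l.length) :
    pyAPost (h :: l) = h :: pyAPost l := by
  obtain ⟨k, hk⟩ : ∃ k, l.length = k + 2 := ⟨l.length - 2, by omega⟩
  unfold pyAPost
  simp only [List.length_cons, hk]
  have c1 : ((k + 2 + 1 : Nat) : Int) - 1 = ((k + 2 : Nat) : Int) := by push_cast; ring
  have c2 : ((k + 2 + 1 : Nat) : Int) - 2 = ((k + 1 : Nat) : Int) := by push_cast; ring
  have c3 : ((k + 2 : Nat) : Int) - 1 = ((k + 1 : Nat) : Int) := by push_cast; ring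
  have c4 : ((k + 2 : Nat) : Int) - 2 = ((k : Nat) : Int) := by push_cast; ring
  rw [c1, c2, c3, c4, PySem.List.pyGetD_natCast, PySem.List.pyGetD_natCast,
    PySem.List.pyGetD_natCast, PySem.List.pyGetD_natCast,
    PySem.List.slice_to_natCast, PySem.List.slice_to_natCast]
  have d1 : (h :: l).getD (k + 2) 'A' = l.getD (k + 1) 'A' := getD_cons_succ h l (k + 1) 'A'
  have d2 : (h :: l).getD (k + 1) 'A' = l.getD k 'A' := getD_cons_succ h l k 'A'
  have d3 : (h :: l).take (k + 2) = h :: l.take (k + 1) := List.take_succ_cons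
  rw [d1, d2, d3]
  by_cases hb : ((l.getD (k + 1) 'A' == ' ') && (l.getD k 'A' != ' ')) = true
  · rw [if_pos hb, if_pos hb]
  · rw [if_neg hb, if_neg hb]

-- the fixup turns cleanA into cleanE
lemma post_clean (t : List Char) : ∀ (h : Char), pyAPost (h :: cleanA h t) = h :: cleanE h t := by
  induction t with
  | nil =>
    intro h
    show pyAPost [h] = [h]
    unfold pyAPost
    by_cases hh : h = ' '
    · subst hh; simp [PySem.List.pyGetD, PySem.List.pyGet?, PySem.List.pyIdx?]
    · simp [PySem.List.pyGetD, PySem.List.pyGet?, PySem.List.pyIdx?, hh]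
  | cons c rest ih =>
    intro h
    by_cases hcond : c = ' ' ∧ rest ≠ [] ∧ h ≠ ' ' ∧ rest.headD 'A' ≠ ' '
    · rw [cleanA, if_pos hcond, cleanE,
        if_pos ⟨hcond.1, hcond.2.2.1, Or.inr hcond.2.2.2⟩]
      exact ih h
    · rw [cleanA, if_neg hcond]
      rcases rest with _ | ⟨r, rs⟩
      · show pyAPost [h, c] = h :: cleanE h [c]
        unfold pyAPost
        have gc : PySem.List.pyGetD [h, c] ((([h, c] : List Char).length : Int) - 1) 'A' = c := by
          simp [PySem.List.pyGetD, PySem.List.pyGet?, PySem.List.pyIdx?]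
        have gh : PySem.List.pyGetD [h, c] ((([h, c] : List Char).length : Int) - 2) 'A' = h := by
          simp [PySem.List.pyGetD, PySem.List.pyGet?, PySem.List.pyIdx?]
        have gsl : PySem.List.slice [h, c] none (some ((([h, c] : List Char).length : Int) - 1)) = [h] := by
          have e : ((([h, c] : List Char).length : Int) - 1) = ((1 : Nat) : Int) := by simp
          rw [e, PySem.List.slice_to_natCast]
          rfl
        rw [gc, gh, gsl]
        by_cases hc : c = ' '
        · by_cases hh : h = ' '
          · simp [cleanE, hc, hh]
          · simp [cleanE, hc, hh]
        · simp [cleanE, hc]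
      · have hne : cleanA c (r :: rs) ≠ [] := cleanA_ne_nil _ _ (by simp)
        have hlen : 2 ≤ (c :: cleanA c (r :: rs)).length := by
          simp [List.length_cons]
          exact List.length_pos_iff.mpr hne
        rw [pyAPost_cons h _ hlen, ih c]
        have he : cleanE h (c :: r :: rs) = c :: cleanE c (r :: rs) := by
          rw [cleanE, if_neg]
          rintro ⟨h1, h2, h3⟩
          rcases h3 with h3 | h3
          · simp at h3
          · exact hcond ⟨h1, by simp, h2, h3⟩
        rw [he]

-- prev is irrelevant when the head is not a space
lemma cleanE_prev_of_head_ne (l : List Char) (p q : Char) (h : l.headD 'A' ≠ ' ') :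
    cleanE p l = cleanE q l := by
  cases l with
  | nil => rfl
  | cons c rest =>
    simp only [List.headD_cons] at h
    simp [cleanE, h]

lemma cleanE_run_nonspace (run : List Char) (c : Char) (rest' : List Char)
    (hc : c ≠ ' ') (hrun : ∀ x ∈ run, x = c) :
    cleanE c (run ++ rest') = run ++ cleanE c rest' := by
  induction run with
  | nil => rfl
  | cons x run' ih =>
    have hx : x = c := hrun x (List.mem_cons_self ..)
    subst hx
    simp only [List.cons_append]
    rw [cleanE, ih (fun x hx => hrun x (List.mem_cons_of_mem _ hx))]
    simp [hc]

lemma cleanE_run_space (run : List Char) (rest' : List Char)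
    (hrun : ∀ x ∈ run, x = ' ') :
    cleanE ' ' (run ++ rest') = run ++ cleanE ' ' rest' := by
  induction run with
  | nil => rfl
  | cons x run' ih =>
    have hx : x = ' ' := hrun x (List.mem_cons_self ..)
    subst hx
    simp only [List.cons_append]
    rw [cleanE, ih (fun x hx => hrun x (List.mem_cons_of_mem _ hx))]
    simp

lemma altGo_nil : altGo [] = [] := by rw [altGo]

lemma altGo_single (c : Char) : altGo [c] = if c = ' ' then [] else [c] := by
  rw [altGo]
  by_cases hc : c = ' '
  · subst hc; simp [altGo_nil]
  · simp [altGo_nil, hc]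

lemma headD_dropWhile_space (l : List Char) : (l.dropWhile (· == ' ')).headD 'A' ≠ ' ' := by
  rcases hd : l.dropWhile (· == ' ') with _ | ⟨x, xs⟩
  · decide
  · have hlen : 0 < (l.dropWhile (· == ' ')).length := by rw [hd]; simp
    have := List.dropWhile_get_zero_not (p := (· == ' ')) l hlen
    simp only [List.get_eq_getElem, hd] at this
    simpa using this

-- B computes cleanE (with any non-space left context)
lemma altGo_eq (n : Nat) : ∀ (l : List Char) (p : Char), l.length ≤ n → p ≠ ' ' →
    cleanE p l = altGo l := by
  induction n with
  | zero =>
    intro l p hl _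
    have : l = [] := List.eq_nil_of_length_eq_zero (Nat.le_zero.mp hl)
    subst this
    rw [altGo_nil]
    rfl
  | succ n ih =>
    intro l p hl hp
    match l with
    | [] => rw [altGo_nil]; rfl
    | c :: rest =>
      have hrlen : rest.length ≤ n := by simpa [List.length_cons] using hl
      have hrlen' : (rest.dropWhile (· == c)).length ≤ n :=
        le_trans (List.length_dropWhile_le _ _) hrlen
      rw [altGo]
      by_cases hc : c = ' '
      · subst hc
        rcases hrun : rest.takeWhile (· == ' ') with _ | ⟨x, run'⟩
        · -- no further spaces follow: the lone space is dropped on both sides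
          have hrest' : rest.dropWhile (· == ' ') = rest := by
            rw [List.dropWhile_eq_self_iff]
            intro h0
            have := List.takeWhile_eq_nil_iff.mp hrun h0
            simpa using this
          have hhead : rest = [] ∨ rest.headD 'A' ≠ ' ' := by
            rcases rest with _ | ⟨y, ys⟩
            · exact Or.inl rfl
            · right
              have := List.takeWhile_eq_nil_iff.mp hrun (by simp)
              simpa using this
          rw [cleanE, if_pos ⟨rfl, hp, hhead⟩, ih rest p hrlen hp]
          simp [hrest']
        · -- a run of ≥ 2 spaces: kept whole on both sides
          have hx : x = ' ' := by
            have hm : x ∈ rest.takeWhile (· == ' ') := by rw [hrun]; simp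
            simpa using List.mem_takeWhile_imp hm
          subst hx
          have hrunsp : ∀ y ∈ (' ' :: run' : List Char), y = ' ' := by
            intro y hy
            rw [← hrun] at hy
            simpa using List.mem_takeWhile_imp hy
          have hsplit : rest = (' ' :: run') ++ rest.dropWhile (· == ' ') := by
            conv_lhs => rw [← List.takeWhile_append_dropWhile (p := (· == ' ')) (l := rest)]
            rw [hrun]
          have hheadrest : rest.headD 'A' = ' ' := by rw [hsplit]; rfl
          rw [cleanE, if_neg (by
            rintro ⟨-, -, h3⟩
            rcases h3 with h3 | h3
            · rw [h3] at hsplit; simp at hsplit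
            · exact h3 hheadrest)]
          conv_lhs => rw [hsplit]
          rw [cleanE_run_space _ _ hrunsp,
            cleanE_prev_of_head_ne _ ' ' p (headD_dropWhile_space rest),
            ih _ p hrlen' hp]
          simp
      · -- non-space head: its whole run is kept on both sides
        have hruneq : ∀ y ∈ rest.takeWhile (· == c), y = c := by
          intro y hy
          simpa using List.mem_takeWhile_imp hy
        rw [cleanE, if_neg (by rintro ⟨h1, -⟩; exact hc h1)]
        conv_lhs => rw [show rest = rest.takeWhile (· == c) ++ rest.dropWhile (· == c) from
          (List.takeWhile_append_dropWhile ..).symm]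
        rw [cleanE_run_nonspace _ c _ hc hruneq, ih _ c hrlen' hc]
        have hbc : (c != ' ') = true := by simpa using hc
        simp [hbc]

theorem byeespace1_eq (text : String) : byeespace1 text = byeespace1_alt text := by
  simp only [byeespace1, byeespace1_alt]
  rcases hcs : text.toList with _ | ⟨c0, rest0⟩
  · rw [if_pos (Or.inl (by simp)), altGo_nil]
    exact congrArg String.ofList (by decide)
  · rcases rest0 with _ | ⟨c1, rest1⟩
    · -- length 1: A strips via replace, B via the lone-run filter
      rw [if_pos (Or.inr (by simp)), altGo_single]
      refine congrArg String.ofList ?_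
      by_cases h0 : c0 = ' '
      · subst h0; rw [if_pos rfl]; decide
      · rw [if_neg h0]
        have h0' : (' ' : Char) ≠ c0 := fun e => h0 e.symm
        simp [PySem.Chars.replace, PySem.Chars.replace.go, h0']
    · -- length ≥ 2: the loop
      rw [if_neg (by simp)]
      refine congrArg String.ofList ?_
      have hget0 : PySem.List.pyGetD (c0 :: c1 :: rest1) 0 'A' = c0 := by
        simp [PySem.List.pyGetD, PySem.List.pyGet?, PySem.List.pyIdx?,
          (by omega : (0 : Int) ≤ (rest1.length : Int) + 1)]
      have hget1 : PySem.List.pyGetD (c0 :: c1 :: rest1) 1 'A' = c1 := by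
        simp [PySem.List.pyGetD, PySem.List.pyGet?, PySem.List.pyIdx?]
      rw [hget0, hget1]
      have main : ∀ (h : Char) (t : List Char),
          pyAPost ((PySem.List.slice (h :: t) none (some (-1))).foldl
            (fun s _ => pyABody s) (h :: t, 1)).1 = h :: cleanE h t := by
        intro h t
        have hsnap : PySem.List.slice (h :: t) none (some (-1)) = (h :: t).dropLast :=
          PySem.List.slice_to_neg_one _
        have hlens : ((h :: t).dropLast).length = t.length := by
          simp [List.length_dropLast]
        have hinit : ((h :: t : List Char), (1 : Int)) =
            (([h] : List Char) ++ t, ((([h] : List Char).length : Nat) : Int)) := by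
          simp
        rw [hsnap, hinit, loop_eq _ [h] t h (by simp) (by simp) hlens]
        show pyAPost ([h] ++ cleanA h t) = _
        rw [List.singleton_append]
        exact post_clean t h
      rw [← altGo_eq (c0 :: c1 :: rest1).length _ 'A' le_rfl (by decide)]
      by_cases hpre : ((c0 == ' ') && (c1 != ' ')) = true
      · rw [if_pos hpre]
        have hc0 : c0 = ' ' := by
          have := (Bool.and_eq_true _ _).mp hpre
          simpa using this.1
        have hc1 : c1 ≠ ' ' := by
          have := (Bool.and_eq_true _ _).mp hpre
          simpa using this.2
        have hsl : PySem.List.slice (c0 :: c1 :: rest1) (some 1) none = c1 :: rest1 := by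
          rw [PySem.List.slice_from_one]
          rfl
        rw [hsl, main c1 rest1]
        subst hc0
        conv_rhs => rw [cleanE, if_pos ⟨rfl, by decide, Or.inr (by simpa using hc1)⟩,
          cleanE, if_neg (by rintro ⟨h1, -⟩; exact hc1 h1)]
      · rw [if_neg hpre, main c0 (c1 :: rest1)]
        by_cases hc0 : c0 = ' '
        · have hc1 : c1 = ' ' := by
            by_contra hc1
            exact hpre (by simp [hc0, hc1])
          conv_rhs => rw [cleanE, if_neg (by
            rintro ⟨-, -, h3⟩
            rcases h3 with h3 | h3
            · simp at h3
            · exact h3 (by simp [hc1]))]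
        · conv_rhs => rw [cleanE, if_neg (by rintro ⟨h1, -⟩; exact hc0 h1)]

-- ===== VERDICT (by name: the statement is the Claim_ definition above) =====
theorem byeespace1_spec : Claim_equal_byeespace1 := by
  intro text _
  unfold Spec_byeespace1
  exact byeespace1_eq text
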